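-- pv_equiv track=rewrite | github.com/SPMQT-Lab/nanonis-file-conversion-1.01 | probeflow/io/readers/createc_vert.py | _selected_output_channels
-- ===== SOURCE A (Python) =====
-- _SPEC_OUTPUT_CHANNELS: dict[str, tuple[str, ...]] = {
--     "ParVERT30": (
--         "I",
--         "dI/dV",
--         "d2I/dV2",
--         "ADC0",
--         "ADC1",
--         "ADC2",
--         "ADC3",
--         "NA01",
--         "NA02",
--         "NA03",
--         "di_q",
--         "di2_q",
--         "DAC0",
--     ),
--     "ParVERT32": (
--         "I",
--         "dI/dV",
--         "d2I/dV2",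
--         "ADC0",
--         "ADC1",
--         "ADC2",
--         "ADC3",
--         "NA01",
--         "NA02",
--         "NA03",
--         "di_q",
--         "di2_q",
--         "DAC0",
--     ),
-- }
--
-- def _selected_output_channels(file_version: str, channel_code: int) -> tuple[str, ...]:
--     names = _SPEC_OUTPUT_CHANNELS.get(file_version, _SPEC_OUTPUT_CHANNELS["ParVERT30"])
--     selected = [
--         name
--         for i, name in enumerate(names)
--         if bool(channel_code & (1 << i))
--     ]
--     return tuple(selected)
-- ===== SOURCE B (Python) =====
-- _SPEC_OUTPUT_CHANNELS: dict[str, tuple[str, ...]] = {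
--     "ParVERT30": (
--         "I", "dI/dV", "d2I/dV2", "ADC0", "ADC1", "ADC2", "ADC3",
--         "NA01", "NA02", "NA03", "di_q", "di2_q", "DAC0",
--     ),
--     "ParVERT32": (
--         "I", "dI/dV", "d2I/dV2", "ADC0", "ADC1", "ADC2", "ADC3",
--         "NA01", "NA02", "NA03", "di_q", "di2_q", "DAC0",
--     ),
-- }
--
--
-- def _selected_output_channels(file_version: str, channel_code: int) -> tuple[str, ...]:
--     names = _SPEC_OUTPUT_CHANNELS.get(file_version, _SPEC_OUTPUT_CHANNELS["ParVERT30"])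
--     # keep only the bits that have a channel name; this also normalises negative codes
--     m = channel_code & ((1 << len(names)) - 1)
--     selected = []
--     while m:
--         rest = m & (m - 1)                    # m with its lowest set bit cleared
--         low = m ^ rest                        # the lowest set bit itself
--         selected.append(names[low.bit_length() - 1])
--         m = rest
--     return tuple(selected)
-- ===== Notes on version B (the rewrite author's own statement) =====
-- stated objective: alternative
-- what changed: B masks the code to the low len(names) bits and then walks only the set bits, repeatedly clearing the lowest set bit (m &= m-1) and indexing names by its bit_length, instead of A's per-position test of every bit via enumerate.
import Mathlib
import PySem

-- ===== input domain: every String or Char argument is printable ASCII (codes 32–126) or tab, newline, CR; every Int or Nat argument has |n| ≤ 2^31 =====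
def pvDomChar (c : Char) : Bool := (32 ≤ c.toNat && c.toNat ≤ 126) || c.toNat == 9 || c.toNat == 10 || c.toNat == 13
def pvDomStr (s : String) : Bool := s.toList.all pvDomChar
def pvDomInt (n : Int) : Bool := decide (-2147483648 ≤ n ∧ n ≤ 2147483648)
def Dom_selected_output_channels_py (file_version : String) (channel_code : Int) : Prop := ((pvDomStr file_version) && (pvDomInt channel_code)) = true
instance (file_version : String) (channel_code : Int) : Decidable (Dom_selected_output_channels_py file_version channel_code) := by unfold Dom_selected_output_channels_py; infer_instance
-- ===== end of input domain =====

-- B selects channel names by repeatedly extracting the lowest set bit of the masked code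
-- instead of testing every bit position; objective: alternative bit-extraction algorithm, same result.

-- module constant _SPEC_OUTPUT_CHANNELS (shared by Source A and Source B)
def pvNames : List String :=
  ["I", "dI/dV", "d2I/dV2", "ADC0", "ADC1", "ADC2", "ADC3",
   "NA01", "NA02", "NA03", "di_q", "di2_q", "DAC0"]

def pvSpec : PySem.Dict String (List String) :=
  PySem.Dict.ofList [("ParVERT30", pvNames), ("ParVERT32", pvNames)]

-- ===== PORT A =====
-- _SPEC_OUTPUT_CHANNELS.get(file_version, _SPEC_OUTPUT_CHANNELS["ParVERT30"]);
-- the key "ParVERT30" is present in the literal dict, so the `.getD []` on its lookup is never the default.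
-- The comprehension keeps name where bool(channel_code & (1 << i)); enumerate indices are ≥ 0, so `.toNat` is exact.
def selected_output_channels_py (file_version : String) (channel_code : Int) : List String :=
  let names := PySem.Dict.getD pvSpec file_version ((PySem.Dict.get? pvSpec "ParVERT30").getD [])
  (PySem.List.enumerate names).filterMap
    (fun p => if PySem.Int.band channel_code ((1 : Int) <<< p.1.toNat) ≠ 0 then some p.2 else none)

-- ===== PORT B =====
-- Source B's while-loop over the masked code m; m is a nonnegative Python int, so Nat is exact.
-- Each step clears the lowest set bit, so m strictly decreases: fuel m suffices for the loop.
-- names[low.bit_length() - 1]: the index is always in range, so the default "" is never returned.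
def pvExtract (names : List String) : Nat → Nat → List String
  | _, 0 => []
  | 0, _ + 1 => []
  | f + 1, m + 1 =>
    let rest := (m + 1) &&& m
    PySem.List.pyGetD names
        ((PySem.Int.bitLength (((m + 1) ^^^ rest : Nat) : Int) : Int) - 1) "" ::
      pvExtract names f rest

def selected_output_channels_py_alt (file_version : String) (channel_code : Int) : List String :=
  let names := PySem.Dict.getD pvSpec file_version ((PySem.Dict.get? pvSpec "ParVERT30").getD [])
  let m := (PySem.Int.band channel_code (((1 : Int) <<< names.length) - 1)).toNat
  pvExtract names m m

-- ===== PRECONDITION & SPEC =====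
def Spec_selected_output_channels_py (file_version : String) (channel_code : Int) (out : List String) : Prop := out = selected_output_channels_py_alt file_version channel_code
instance (file_version : String) (channel_code : Int) (out : List String) : Decidable (Spec_selected_output_channels_py file_version channel_code out) := by unfold Spec_selected_output_channels_py; infer_instance

-- ===== CLAIM (what is proved, stated in full; the proofs are below) =====
def Claim_equal_selected_output_channels_py : Prop := ∀ (file_version : String) (channel_code : Int), Dom_selected_output_channels_py file_version channel_code → Spec_selected_output_channels_py file_version channel_code (selected_output_channels_py file_version channel_code)

-- ===== LEMMAS AND PROOFS =====

theorem pvSpec_items : pvSpec.items = [("ParVERT30", pvNames), ("ParVERT32", pvNames)] := by rfl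

-- both keys of the dict map to pvNames, and so does the default, so the lookup is always pvNames
theorem names_eq (fv : String) :
    PySem.Dict.getD pvSpec fv ((PySem.Dict.get? pvSpec "ParVERT30").getD []) = pvNames := by
  simp only [PySem.Dict.getD, PySem.Dict.get?, pvSpec_items, List.find?]
  by_cases h1 : ("ParVERT30" == fv) = true <;> by_cases h2 : ("ParVERT32" == fv) = true <;>
    simp [h1, h2]

-- a positive number decomposed at its lowest set bit: m = 2^(k+1)*a + 2^k
theorem pv_decomp (m : Nat) (hm : 0 < m) :
    ∃ k a, m = 2 ^ (k + 1) * a + 2 ^ k := by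
  obtain ⟨k, b, hb, hmb⟩ := Nat.exists_eq_two_pow_mul_odd hm.ne'
  obtain ⟨a, ha⟩ := hb
  exact ⟨k, a, by rw [hmb, ha]; ring⟩

theorem pv_testBit_m (k a j : Nat) :
    (2 ^ (k + 1) * a + 2 ^ k).testBit j =
      if j < k + 1 then decide (k = j) else a.testBit (j - (k + 1)) := by
  rw [Nat.testBit_two_pow_mul_add a (Nat.pow_lt_pow_right (by norm_num) (Nat.lt_succ_self k)) j]
  split <;> simp [Nat.testBit_two_pow]

-- m & (m - 1) clears the lowest set bit
theorem pv_rest_eq (k a : Nat) :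
    (2 ^ (k + 1) * a + 2 ^ k) &&& (2 ^ (k + 1) * a + 2 ^ k - 1) = 2 ^ (k + 1) * a := by
  have h1 : 2 ^ (k + 1) * a + 2 ^ k - 1 = 2 ^ (k + 1) * a + (2 ^ k - 1) := by
    have : 0 < 2 ^ k := Nat.two_pow_pos k
    omega
  apply Nat.eq_of_testBit_eq
  intro j
  rw [Nat.testBit_land, pv_testBit_m, h1,
    Nat.testBit_two_pow_mul_add a
      (lt_of_le_of_lt (Nat.sub_le _ _) (Nat.pow_lt_pow_right (by norm_num) (Nat.lt_succ_self k))) j,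
    Nat.testBit_two_pow_mul]
  split
  · rename_i hj
    by_cases h : k = j
    · simp [h, Nat.testBit_two_pow_sub_one]
    · simp [h, Nat.testBit_two_pow_sub_one, show ¬ k < j by omega]
  · rename_i hj
    simp [show k + 1 ≤ j by omega]

-- m ^ (m & (m - 1)) is exactly the lowest set bit
theorem pv_low_eq (k a : Nat) :
    (2 ^ (k + 1) * a + 2 ^ k) ^^^ (2 ^ (k + 1) * a) = 2 ^ k := by
  apply Nat.eq_of_testBit_eq
  intro j
  rw [Nat.testBit_xor, pv_testBit_m, Nat.testBit_two_pow_mul, Nat.testBit_two_pow]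
  split
  · rename_i hj; simp [show ¬ (k + 1 ≤ j) by omega]
  · rename_i hj; simp [show k + 1 ≤ j by omega, show ¬ (k = j) by omega]

theorem pv_bitLength_pow (k : Nat) : PySem.Int.bitLength ((2 ^ k : Nat) : Int) = k + 1 := by
  have h1 := PySem.Int.lt_two_pow_bitLength ((2 ^ k : Nat) : Int)
  have h2 := PySem.Int.two_pow_bitLength_le ((2 ^ k : Nat) : Int) (by positivity)
  rw [Int.natAbs_natCast] at h1 h2
  set L := PySem.Int.bitLength ((2 ^ k : Nat) : Int) with hL
  have hk1 : k < L := (Nat.pow_lt_pow_iff_right (by norm_num)).mp h1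
  have hk2 : L - 1 ≤ k := (Nat.pow_le_pow_iff_right (by norm_num)).mp h2
  omega

-- the ascending filter of set bits splits off the lowest set bit first
theorem pv_filter_split (w k a : Nat) (hk : k < w) :
    (List.range w).filter (fun i => (2 ^ (k + 1) * a + 2 ^ k).testBit i)
      = k :: (List.range w).filter (fun i => (2 ^ (k + 1) * a).testBit i) := by
  have hw : w = (k + 1) + (w - (k + 1)) := by omega
  rw [hw, List.range_add, List.filter_append, List.filter_append,
    List.filter_map, List.filter_map, List.range_succ, List.filter_append, List.filter_append]
  have low_m : (List.range k).filter (fun i => (2 ^ (k + 1) * a + 2 ^ k).testBit i) = [] := by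
    rw [List.filter_eq_nil_iff]
    intro i hi
    rw [List.mem_range] at hi
    simp [pv_testBit_m, show i < k + 1 by omega, show ¬ k = i by omega]
  have at_k : [k].filter (fun i => (2 ^ (k + 1) * a + 2 ^ k).testBit i) = [k] := by
    simp [pv_testBit_m]
  have low_r : (List.range (k + 1)).filter (fun i => (2 ^ (k + 1) * a).testBit i) = [] := by
    rw [List.filter_eq_nil_iff]
    intro i hi
    rw [List.mem_range] at hi
    simp [Nat.testBit_two_pow_mul, show ¬ k + 1 ≤ i by omega]
  have hi_eq : ((List.range (w - (k + 1))).filter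
        ((fun i => (2 ^ (k + 1) * a + 2 ^ k).testBit i) ∘ (k + 1 + ·)))
      = ((List.range (w - (k + 1))).filter ((fun i => (2 ^ (k + 1) * a).testBit i) ∘ (k + 1 + ·))) := by
    apply List.filter_congr
    intro x _
    simp [Function.comp, pv_testBit_m, Nat.testBit_two_pow_mul,
      show ¬ k + 1 + x < k + 1 by omega, show k + 1 ≤ k + 1 + x by omega]
  rw [List.range_succ, List.filter_append] at low_r
  rw [low_m, at_k, hi_eq]
  rcases List.append_eq_nil_iff.mp low_r with ⟨l1, l2⟩
  rw [l1, l2]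
  simp

-- the extraction loop of B produces the names of the set bits in ascending bit order
theorem pv_extract_spec (names : List String) (w : Nat) :
    ∀ m f, m ≤ f → m < 2 ^ w →
      pvExtract names f m
        = ((List.range w).filter (m.testBit ·)).map
            (fun (i : Nat) => PySem.List.pyGetD names (i : Int) "") := by
  intro m
  induction m using Nat.strong_induction_on with
  | _ m IH =>
    intro f hf hw
    match m, f with
    | 0, f =>
      simp [Nat.zero_testBit]
      cases f <;> rfl
    | m' + 1, f' + 1 =>
      obtain ⟨k, a, hm⟩ := pv_decomp (m' + 1) (Nat.succ_pos m')
      have hrest : (m' + 1) &&& m' = 2 ^ (k + 1) * a := by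
        have := pv_rest_eq k a
        rw [← hm] at this
        simpa using this
      have hlow : (m' + 1) ^^^ ((m' + 1) &&& m') = 2 ^ k := by
        rw [hrest]
        have := pv_low_eq k a
        rw [← hm] at this
        exact this
      have hkw : k < w := by
        have h1 : 2 ^ k ≤ m' + 1 := by omega
        have := lt_of_le_of_lt h1 hw
        exact (Nat.pow_lt_pow_iff_right (by norm_num)).mp this
      have hrlt : (m' + 1) &&& m' < m' + 1 := by
        have := Nat.and_le_right (n := m' + 1) (m := m')
        omega
      show PySem.List.pyGetD names
          ((PySem.Int.bitLength (((m' + 1) ^^^ ((m' + 1) &&& m') : Nat) : Int) : Int) - 1) "" ::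
          pvExtract names f' ((m' + 1) &&& m') = _
      rw [hlow, pv_bitLength_pow k, hrest]
      rw [IH (2 ^ (k + 1) * a) (by omega) f'
        (by have := Nat.and_le_right (n := m' + 1) (m := m'); omega) (by omega)]
      rw [hm, pv_filter_split w k a hkw]
      rw [List.map_cons]
      congr 2
      push_cast
      omega

-- bitwise complement within w bits, as the subtraction 2^w - 1 - r
theorem pv_testBit_compl :
    ∀ w r, r < 2 ^ w → ∀ i, i < w → (2 ^ w - 1 - r).testBit i = !r.testBit i := by
  intro w
  induction w with
  | zero => intro r _ i hi; omega
  | succ w IH =>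
    intro r hr i hi
    have hp : 2 ^ (w + 1) = 2 * 2 ^ w := by ring
    have hr' : r / 2 < 2 ^ w := by omega
    have hx : 2 ^ (w + 1) - 1 - r = 2 * (2 ^ w - 1 - r / 2) + (1 - r % 2) := by
      have h1 : 0 < 2 ^ w := Nat.two_pow_pos w
      omega
    cases i with
    | zero =>
      rw [Nat.testBit_zero, Nat.testBit_zero, hx]
      rcases Nat.mod_two_eq_zero_or_one r with h | h <;> simp [h]
    | succ i =>
      rw [← Nat.testBit_div_two, ← Nat.testBit_div_two, hx]
      have hd : (2 * (2 ^ w - 1 - r / 2) + (1 - r % 2)) / 2 = 2 ^ w - 1 - r / 2 := by omega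
      rw [hd]
      exact IH (r / 2) hr' i (by omega)

-- A's per-bit test agrees with the bits of the masked code B works on
theorem pv_band_test (code : Int) (i : Nat) (hi : i < 13) :
    (PySem.Int.band code ((1 : Int) <<< i) ≠ 0) ↔
      ((PySem.Int.band code 8191).toNat).testBit i = true := by
  have hsl : ((1 : Int) <<< i) = ((2 ^ i : Nat) : Int) := by
    rw [Int.shiftLeft_eq]; push_cast; ring
  have h8191 : (8191 : Int) = ((8191 : Nat) : Int) := by norm_num
  by_cases hc : 0 ≤ code
  · rw [hsl, h8191]
    unfold PySem.Int.band
    rw [if_pos hc, if_pos (by positivity), if_pos hc, if_pos (by norm_num)]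
    rw [Int.toNat_natCast, Int.toNat_natCast, Int.toNat_natCast]
    have hmod : code.toNat &&& 8191 = code.toNat % 2 ^ 13 := by
      have := Nat.and_two_pow_sub_one_eq_mod code.toNat 13
      norm_num at this
      exact this
    rw [hmod, Nat.testBit_mod_two_pow, Nat.and_two_pow]
    constructor
    · intro h
      cases htb : code.toNat.testBit i with
      | false => rw [htb] at h; simp at h
      | true => simp [hi]
    · intro h
      have htb : code.toNat.testBit i = true := by
        cases htb : code.toNat.testBit i with
        | false => rw [Bool.and_eq_true] at h; rw [htb] at h; simp at h
        | true => rfl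
      rw [htb]
      simp
  · rw [hsl, h8191]
    unfold PySem.Int.band
    rw [if_neg hc, if_pos (by positivity), if_neg hc, if_pos (by norm_num)]
    rw [Int.toNat_natCast, Int.toNat_natCast, Int.toNat_natCast]
    set K := (-code - 1).toNat with hK
    have hand : 2 ^ i &&& K = (K.testBit i).toNat * 2 ^ i := by
      rw [Nat.and_comm, Nat.and_two_pow]
    have hand2 : 8191 &&& K = K % 2 ^ 13 := by
      rw [Nat.and_comm]
      have := Nat.and_two_pow_sub_one_eq_mod K 13
      norm_num at this
      exact this
    rw [hand, hand2]
    have hsub : (8191 : Nat) - K % 2 ^ 13 = 2 ^ 13 - 1 - K % 2 ^ 13 := by norm_num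
    rw [hsub, pv_testBit_compl 13 (K % 2 ^ 13) (Nat.mod_lt _ (by norm_num)) i hi,
      Nat.testBit_mod_two_pow]
    cases htb : K.testBit i with
    | false => simp [hi]
    | true => simp [hi]

-- the masked code is below 2^13
theorem pv_m_lt (code : Int) : (PySem.Int.band code 8191).toNat < 2 ^ 13 := by
  have h8191 : (8191 : Int) = ((8191 : Nat) : Int) := by norm_num
  rw [h8191]
  unfold PySem.Int.band
  by_cases hc : 0 ≤ code
  · rw [if_pos hc, if_pos (by norm_num), Int.toNat_natCast, Int.toNat_natCast]
    have := Nat.and_le_right (n := code.toNat) (m := 8191)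
    omega
  · rw [if_neg hc, if_pos (by norm_num), Int.toNat_natCast, Int.toNat_natCast]
    omega

-- A's comprehension over enumerate, as filter-then-map over the index range
theorem pv_A_shape (P : Int → Prop) [DecidablePred P] :
    ∀ (names : List String) (s : Int),
      (PySem.List.enumerate names s).filterMap (fun p => if P p.1 then some p.2 else none)
        = ((List.range names.length).filter (fun (i : Nat) => decide (P (s + (i : Int))))).map
            (fun (i : Nat) => names.getD i "") := by
  intro names
  induction names with
  | nil => intro s; rfl
  | cons n rest IH =>
    intro s
    have he : PySem.List.enumerate (n :: rest) s = (s, n) :: PySem.List.enumerate rest (s + 1) := by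
      rfl
    have hc : ((fun (i : Nat) => decide (P (s + (i : Int)))) ∘ Nat.succ)
        = fun (i : Nat) => decide (P ((s + 1) + (i : Int))) := by
      funext i
      simp only [Function.comp, Nat.succ_eq_add_one]
      rw [show s + ((i + 1 : Nat) : Int) = (s + 1) + (i : Int) by push_cast; omega]
    rw [he, List.filterMap_cons, List.length_cons, List.range_succ_eq_map, List.filter_cons]
    by_cases hP : P s
    · simp [hP, List.filter_map, hc, IH (s + 1), List.map_map, Function.comp,
        Nat.succ_eq_add_one]
    · simp [hP, List.filter_map, hc, IH (s + 1), List.map_map, Function.comp,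
        Nat.succ_eq_add_one]

theorem pv_main (fv : String) (code : Int) :
    selected_output_channels_py fv code = selected_output_channels_py_alt fv code := by
  unfold selected_output_channels_py selected_output_channels_py_alt
  simp only [names_eq]
  have h13 : ((1 : Int) <<< pvNames.length) - 1 = 8191 := by rfl
  rw [h13]
  simp only [Int.shiftLeft_natCast_right]
  rw [pv_A_shape (fun t => PySem.Int.band code ((1 : Int) <<< t.toNat) ≠ 0) pvNames 0]
  rw [pv_extract_spec pvNames 13 ((PySem.Int.band code 8191).toNat)
    ((PySem.Int.band code 8191).toNat) le_rfl (pv_m_lt code)]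
  have hlen : pvNames.length = 13 := by rfl
  rw [hlen]
  have hfil : (List.range 13).filter
        (fun (i : Nat) => decide (PySem.Int.band code ((1 : Int) <<< ((0 : Int) + (i : Int)).toNat) ≠ 0))
      = (List.range 13).filter (((PySem.Int.band code 8191).toNat).testBit ·) := by
    apply List.filter_congr
    intro i hi
    rw [List.mem_range] at hi
    have ht : ((0 : Int) + (i : Int)).toNat = i := by omega
    rw [ht]
    rcases Bool.eq_false_or_eq_true (((PySem.Int.band code 8191).toNat).testBit i) with h | h <;>
      simp [h, (pv_band_test code i hi), -ne_eq]
  rw [hfil]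
  apply List.map_congr_left
  intro i hi
  rw [List.mem_filter, List.mem_range] at hi
  rw [PySem.List.pyGetD_natCast]

-- ===== VERDICT (by name: the statement is the Claim_ definition above) =====
theorem selected_output_channels_py_spec : Claim_equal_selected_output_channels_py := by
  intro fv code _dom
  unfold Spec_selected_output_channels_py
  exact pv_main fv code
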